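-- pv_equiv track=rewrite | github.com/masein/accounting-assistant-web | app/services/reporting/uk_statement_service.py | _uk_cf_directional
-- ===== SOURCE A (Python) =====
-- _UK_CF_CATEGORY_MAP: list[tuple[str, str]] = [
--     # Investing — fixed-asset categories
--     ("00", "inv_ppe"),
--     ("01", "inv_intangibles"),
--     ("02", "inv_investments"),
--     # Financing
--     ("3000", "fin_share_capital"),
--     ("3010", "fin_share_premium"),
--     ("2600", "fin_borrowings"),     # bank loan ST current portion
--     ("2800", "fin_borrowings"),     # bank loan LT
--     ("2810", "fin_lease"),
--     # Tax
--     ("2300", "op_tax_paid"),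
--     # Interest receipts / payments — captured under operating in FRS 102 1A
--     ("8100", "op_interest_paid"),
--     ("8200", "op_interest_paid"),
--     ("8300", "op_interest_received"),
--     ("8400", "op_investment_income"),
-- ]
--
-- def _cf_section_for_uk(category: str) -> str:
--     if category.startswith("inv_"):
--         return "investing"
--     if category.startswith("fin_"):
--         return "financing"
--     return "operating"
--
-- def _uk_cf_directional(code: str, cash_delta: int) -> tuple[str, str]:
--     for prefix, category in _UK_CF_CATEGORY_MAP:
--         if code.startswith(prefix):
--             section = _cf_section_for_uk(category)
--             if category in {"op_tax_paid", "op_interest_paid", "op_interest_received", "op_investment_income"}: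
--                 return (section, category)
--             suffix = "_inflow" if cash_delta > 0 else "_outflow"
--             return (section, category + suffix)
--     return ("operating", "op_other")
-- ===== SOURCE B (Python) =====
-- # B: hand-compiled decision tree on individual characters (a trie unrolled into nested ifs);
-- # no prefix table and no startswith scan, and the section/directionality are stored at the leaves.
--
-- def _uk_cf_directional(code: str, cash_delta: int) -> tuple[str, str]:
--     n = len(code)
--     hit = None  # (section, category, directional)
--     if n >= 2 and code[0] == '0':
--         if code[1] == '0':
--             hit = ('investing', 'inv_ppe', True)
--         elif code[1] == '1':
--             hit = ('investing', 'inv_intangibles', True)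
--         elif code[1] == '2':
--             hit = ('investing', 'inv_investments', True)
--     elif n >= 4:
--         c0, c1, c2, c3 = code[0], code[1], code[2], code[3]
--         if c0 == '3' and c1 == '0' and c3 == '0':
--             if c2 == '0':
--                 hit = ('financing', 'fin_share_capital', True)
--             elif c2 == '1':
--                 hit = ('financing', 'fin_share_premium', True)
--         elif c0 == '2':
--             if c1 == '6' and c2 == '0' and c3 == '0':
--                 hit = ('financing', 'fin_borrowings', True)
--             elif c1 == '8' and c3 == '0':
--                 if c2 == '0':
--                     hit = ('financing', 'fin_borrowings', True)
--                 elif c2 == '1':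
--                     hit = ('financing', 'fin_lease', True)
--             elif c1 == '3' and c2 == '0' and c3 == '0':
--                 hit = ('operating', 'op_tax_paid', False)
--         elif c0 == '8' and c2 == '0' and c3 == '0':
--             if c1 == '1' or c1 == '2':
--                 hit = ('operating', 'op_interest_paid', False)
--             elif c1 == '3':
--                 hit = ('operating', 'op_interest_received', False)
--             elif c1 == '4':
--                 hit = ('operating', 'op_investment_income', False)
--     if hit is None:
--         return ('operating', 'op_other')
--     section, category, directional = hit
--     if not directional:
--         return (section, category)
--     return (section, category + ('_inflow' if cash_delta > 0 else '_outflow'))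
-- ===== Notes on version B (the rewrite author's own statement) =====
-- stated objective: alternative
-- what changed: Replaced the ordered linear startswith scan over the prefix/category table with a hand-compiled per-character decision tree (an unrolled trie of nested ifs on code[0..3]) whose leaves store section, category and directionality directly, so there is no table, no startswith and no section derivation from the category name at call time.
import Mathlib
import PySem

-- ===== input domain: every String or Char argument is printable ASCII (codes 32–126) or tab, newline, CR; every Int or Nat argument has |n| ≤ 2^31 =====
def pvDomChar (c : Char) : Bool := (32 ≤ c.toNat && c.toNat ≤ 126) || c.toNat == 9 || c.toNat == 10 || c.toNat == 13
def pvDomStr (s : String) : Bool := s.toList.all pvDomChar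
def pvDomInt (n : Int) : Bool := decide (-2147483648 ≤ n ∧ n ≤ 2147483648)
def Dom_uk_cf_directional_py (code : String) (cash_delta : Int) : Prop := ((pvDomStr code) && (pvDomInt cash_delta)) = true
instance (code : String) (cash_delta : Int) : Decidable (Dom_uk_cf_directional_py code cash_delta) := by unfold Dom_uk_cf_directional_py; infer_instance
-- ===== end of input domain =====

-- B replaces A's ordered startswith scan over a prefix table with a hand-compiled per-character decision tree whose leaves carry section and directionality; idiomatic, same cost class.


-- ===== PORT A =====
def ukCfCategoryMap : List (String × String) := [
  ("00", "inv_ppe"),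
  ("01", "inv_intangibles"),
  ("02", "inv_investments"),
  ("3000", "fin_share_capital"),
  ("3010", "fin_share_premium"),
  ("2600", "fin_borrowings"),
  ("2800", "fin_borrowings"),
  ("2810", "fin_lease"),
  ("2300", "op_tax_paid"),
  ("8100", "op_interest_paid"),
  ("8200", "op_interest_paid"),
  ("8300", "op_interest_received"),
  ("8400", "op_investment_income")]

def cfSectionForUk (category : String) : String :=
  if PySem.Str.startswith category "inv_" then "investing"
  else if PySem.Str.startswith category "fin_" then "financing"
  else "operating"

def ukCfLoop (code : String) (cash_delta : Int) : List (String × String) → String × String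
  | [] => ("operating", "op_other")
  | (pfx, category) :: rest =>
    if PySem.Str.startswith code pfx then
      let sec := cfSectionForUk category
      if (PySem.Set.ofList ["op_tax_paid", "op_interest_paid", "op_interest_received", "op_investment_income"]).contains category then
        (sec, category)
      else
        let suffix := if cash_delta > 0 then "_inflow" else "_outflow"
        (sec, category ++ suffix)
    else ukCfLoop code cash_delta rest

def uk_cf_directional_py (code : String) (cash_delta : Int) : String × String :=
  ukCfLoop code cash_delta ukCfCategoryMap

-- ===== PORT B =====
-- Transliteration of Source B's decision tree; code[i] is accessed only under the length
-- guards, so List.getD is exact there (the default is never used).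
def uk_cf_directional_py_alt (code : String) (cash_delta : Int) : String × String :=
  let cs := code.toList
  let n := cs.length
  let hit : Option (String × String × Bool) :=
    if 2 ≤ n ∧ cs.getD 0 ' ' = '0' then
      if cs.getD 1 ' ' = '0' then some ("investing", "inv_ppe", true)
      else if cs.getD 1 ' ' = '1' then some ("investing", "inv_intangibles", true)
      else if cs.getD 1 ' ' = '2' then some ("investing", "inv_investments", true)
      else none
    else if 4 ≤ n then
      let c0 := cs.getD 0 ' '; let c1 := cs.getD 1 ' '; let c2 := cs.getD 2 ' '; let c3 := cs.getD 3 ' '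
      if c0 = '3' ∧ c1 = '0' ∧ c3 = '0' then
        if c2 = '0' then some ("financing", "fin_share_capital", true)
        else if c2 = '1' then some ("financing", "fin_share_premium", true)
        else none
      else if c0 = '2' then
        if c1 = '6' ∧ c2 = '0' ∧ c3 = '0' then some ("financing", "fin_borrowings", true)
        else if c1 = '8' ∧ c3 = '0' then
          if c2 = '0' then some ("financing", "fin_borrowings", true)
          else if c2 = '1' then some ("financing", "fin_lease", true)
          else none
        else if c1 = '3' ∧ c2 = '0' ∧ c3 = '0' then some ("operating", "op_tax_paid", false)
        else none
      else if c0 = '8' ∧ c2 = '0' ∧ c3 = '0' then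
        if c1 = '1' ∨ c1 = '2' then some ("operating", "op_interest_paid", false)
        else if c1 = '3' then some ("operating", "op_interest_received", false)
        else if c1 = '4' then some ("operating", "op_investment_income", false)
        else none
      else none
    else none
  match hit with
  | none => ("operating", "op_other")
  | some (sec, category, directional) =>
    if !directional then (sec, category)
    else (sec, category ++ (if cash_delta > 0 then "_inflow" else "_outflow"))

-- ===== PRECONDITION & SPEC =====
def Spec_uk_cf_directional_py (code : String) (cash_delta : Int) (out : String × String) : Prop := out = uk_cf_directional_py_alt code cash_delta
instance (code : String) (cash_delta : Int) (out : String × String) : Decidable (Spec_uk_cf_directional_py code cash_delta out) := by unfold Spec_uk_cf_directional_py; infer_instance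

-- ===== CLAIM (what is proved, stated in full; the proofs are below) =====
def Claim_equal_uk_cf_directional_py : Prop := ∀ (code : String) (cash_delta : Int), Dom_uk_cf_directional_py code cash_delta → Spec_uk_cf_directional_py code cash_delta (uk_cf_directional_py code cash_delta)

-- ===== LEMMAS AND PROOFS =====

-- startswith by a literal prefix is an equation on the corresponding take of the code points
theorem pv_sw_iff (s p : String) : (PySem.Str.startswith s p = true) ↔ s.toList.take p.toList.length = p.toList := by
  rw [PySem.Str.startswith_eq, PySem.Chars.startswith_iff, List.prefix_iff_eq_take, eq_comm]

-- a take-2 equation is a length bound plus two character equations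
theorem pv_take2_iff (l : List Char) (x y : Char) :
    (l.take 2 = [x, y]) ↔ (2 ≤ l.length ∧ l.getD 0 ' ' = x ∧ l.getD 1 ' ' = y) := by
  rcases l with _ | ⟨a, _ | ⟨b, t⟩⟩ <;> simp

-- a take-4 equation is a length bound plus four character equations
theorem pv_take4_iff (l : List Char) (x y z w : Char) :
    (l.take 4 = [x, y, z, w]) ↔ (4 ≤ l.length ∧ l.getD 0 ' ' = x ∧ l.getD 1 ' ' = y ∧ l.getD 2 ' ' = z ∧ l.getD 3 ' ' = w) := by
  rcases l with _ | ⟨a, _ | ⟨b, _ | ⟨c, _ | ⟨d, t⟩⟩⟩⟩ <;> simp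

set_option maxHeartbeats 2000000 in
-- ===== VERDICT (by name: the statement is the Claim_ definition above) =====
theorem uk_cf_directional_py_spec : Claim_equal_uk_cf_directional_py := by
  intro code cash_delta hdom
  clear hdom
  unfold Spec_uk_cf_directional_py uk_cf_directional_py uk_cf_directional_py_alt
  simp only [ukCfCategoryMap, ukCfLoop, pv_sw_iff]
  simp only [show ("00" : String).toList = ['0','0'] from by decide,
    show ("01" : String).toList = ['0','1'] from by decide,
    show ("02" : String).toList = ['0','2'] from by decide,
    show ("3000" : String).toList = ['3','0','0','0'] from by decide,
    show ("3010" : String).toList = ['3','0','1','0'] from by decide,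
    show ("2600" : String).toList = ['2','6','0','0'] from by decide,
    show ("2800" : String).toList = ['2','8','0','0'] from by decide,
    show ("2810" : String).toList = ['2','8','1','0'] from by decide,
    show ("2300" : String).toList = ['2','3','0','0'] from by decide,
    show ("8100" : String).toList = ['8','1','0','0'] from by decide,
    show ("8200" : String).toList = ['8','2','0','0'] from by decide,
    show ("8300" : String).toList = ['8','3','0','0'] from by decide,
    show ("8400" : String).toList = ['8','4','0','0'] from by decide,
    List.length_cons, List.length_nil, Nat.reduceAdd, pv_take2_iff, pv_take4_iff]
  generalize code.toList = l
  simp only [show (PySem.Set.ofList ["op_tax_paid", "op_interest_paid", "op_interest_received", "op_investment_income"]).contains "inv_ppe" = false from by decide,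
    show cfSectionForUk "inv_ppe" = "investing" from by decide,
    show (PySem.Set.ofList ["op_tax_paid", "op_interest_paid", "op_interest_received", "op_investment_income"]).contains "inv_intangibles" = false from by decide,
    show cfSectionForUk "inv_intangibles" = "investing" from by decide,
    show (PySem.Set.ofList ["op_tax_paid", "op_interest_paid", "op_interest_received", "op_investment_income"]).contains "inv_investments" = false from by decide,
    show cfSectionForUk "inv_investments" = "investing" from by decide,
    show (PySem.Set.ofList ["op_tax_paid", "op_interest_paid", "op_interest_received", "op_investment_income"]).contains "fin_share_capital" = false from by decide,
    show cfSectionForUk "fin_share_capital" = "financing" from by decide,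
    show (PySem.Set.ofList ["op_tax_paid", "op_interest_paid", "op_interest_received", "op_investment_income"]).contains "fin_share_premium" = false from by decide,
    show cfSectionForUk "fin_share_premium" = "financing" from by decide,
    show (PySem.Set.ofList ["op_tax_paid", "op_interest_paid", "op_interest_received", "op_investment_income"]).contains "fin_borrowings" = false from by decide,
    show cfSectionForUk "fin_borrowings" = "financing" from by decide,
    show (PySem.Set.ofList ["op_tax_paid", "op_interest_paid", "op_interest_received", "op_investment_income"]).contains "fin_lease" = false from by decide,
    show cfSectionForUk "fin_lease" = "financing" from by decide,
    show (PySem.Set.ofList ["op_tax_paid", "op_interest_paid", "op_interest_received", "op_investment_income"]).contains "op_tax_paid" = true from by decide,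
    show cfSectionForUk "op_tax_paid" = "operating" from by decide,
    show (PySem.Set.ofList ["op_tax_paid", "op_interest_paid", "op_interest_received", "op_investment_income"]).contains "op_interest_paid" = true from by decide,
    show cfSectionForUk "op_interest_paid" = "operating" from by decide,
    show (PySem.Set.ofList ["op_tax_paid", "op_interest_paid", "op_interest_received", "op_investment_income"]).contains "op_interest_received" = true from by decide,
    show cfSectionForUk "op_interest_received" = "operating" from by decide,
    show (PySem.Set.ofList ["op_tax_paid", "op_interest_paid", "op_interest_received", "op_investment_income"]).contains "op_investment_income" = true from by decide,
    show cfSectionForUk "op_investment_income" = "operating" from by decide]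
  by_cases h2 : 2 ≤ l.length
  · by_cases e0 : l.getD 0 ' ' = '0'
    · by_cases f0 : l.getD 1 ' ' = '0'
      · simp_all
      · by_cases f1 : l.getD 1 ' ' = '1'
        · simp_all
        · by_cases f2 : l.getD 1 ' ' = '2'
          · simp_all
          · simp_all
    · by_cases h4 : 4 ≤ l.length
      · by_cases e3 : l.getD 0 ' ' = '3'
        · by_cases f0 : l.getD 1 ' ' = '0'
          · by_cases k0 : l.getD 3 ' ' = '0'
            · by_cases g0 : l.getD 2 ' ' = '0'
              · simp_all
              · by_cases g1 : l.getD 2 ' ' = '1'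
                · simp_all
                · simp_all
            · simp_all
          · simp_all
        · by_cases e2 : l.getD 0 ' ' = '2'
          · by_cases f6 : l.getD 1 ' ' = '6'
            · by_cases g0 : l.getD 2 ' ' = '0'
              · by_cases k0 : l.getD 3 ' ' = '0'
                · simp_all
                · simp_all
              · simp_all
            · by_cases f8 : l.getD 1 ' ' = '8'
              · by_cases k0 : l.getD 3 ' ' = '0'
                · by_cases g0 : l.getD 2 ' ' = '0'
                  · simp_all
                  · by_cases g1 : l.getD 2 ' ' = '1'
                    · simp_all
                    · simp_all
                · simp_all
              · by_cases f3 : l.getD 1 ' ' = '3'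
                · by_cases g0 : l.getD 2 ' ' = '0'
                  · by_cases k0 : l.getD 3 ' ' = '0'
                    · simp_all
                    · simp_all
                  · simp_all
                · simp_all
          · by_cases e8 : l.getD 0 ' ' = '8'
            · by_cases g0 : l.getD 2 ' ' = '0'
              · by_cases k0 : l.getD 3 ' ' = '0'
                · by_cases f1 : l.getD 1 ' ' = '1'
                  · simp_all
                  · by_cases fB : l.getD 1 ' ' = '2'
                    · simp_all
                    · by_cases fC : l.getD 1 ' ' = '3'
                      · simp_all
                      · by_cases fD : l.getD 1 ' ' = '4'
                        · simp_all
                        · simp_all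
                · simp_all
              · simp_all
            · simp_all
      · simp only [List.getD_eq_getElem?_getD] at e0
        simp [e0, h4]
  · have h4 : ¬ 4 ≤ l.length := by omega
    simp_all
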